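-- pv_equiv track=rewrite | github.com/katemayoneill/final-year-project | evaluation/sensitivity/sweep_prominence.py | split_runs
-- ===== SOURCE A (Python) =====
-- CONTIGUOUS_GAP      = 30
--
-- def split_runs(series):
--     if not series:
--         return []
--     runs, cur = [], [series[0]]
--     for prev, curr in zip(series, series[1:]):
--         if curr[0] - prev[0] <= CONTIGUOUS_GAP:
--             cur.append(curr)
--         else:
--             runs.append(cur)
--             cur = [curr]
--     runs.append(cur)
--     return runs
-- ===== SOURCE B (Python) =====
-- CONTIGUOUS_GAP = 30
--
-- def split_runs(series):
--     if not series: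
--         return []
--     n = len(series)
--     bounds = [0] + [i for i in range(1, n)
--                     if series[i][0] - series[i - 1][0] > CONTIGUOUS_GAP] + [n]
--     return [series[b:e] for b, e in zip(bounds, bounds[1:])]
-- ===== Notes on version B (the rewrite author's own statement) =====
-- stated objective: alternative
-- what changed: B replaces A's streaming accumulator (cur/runs built point by point along zip(series, series[1:])) by a two-phase decomposition: first collect the boundary indices where the gap exceeds CONTIGUOUS_GAP, then emit each run as a slice between consecutive boundaries.
import Mathlib
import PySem

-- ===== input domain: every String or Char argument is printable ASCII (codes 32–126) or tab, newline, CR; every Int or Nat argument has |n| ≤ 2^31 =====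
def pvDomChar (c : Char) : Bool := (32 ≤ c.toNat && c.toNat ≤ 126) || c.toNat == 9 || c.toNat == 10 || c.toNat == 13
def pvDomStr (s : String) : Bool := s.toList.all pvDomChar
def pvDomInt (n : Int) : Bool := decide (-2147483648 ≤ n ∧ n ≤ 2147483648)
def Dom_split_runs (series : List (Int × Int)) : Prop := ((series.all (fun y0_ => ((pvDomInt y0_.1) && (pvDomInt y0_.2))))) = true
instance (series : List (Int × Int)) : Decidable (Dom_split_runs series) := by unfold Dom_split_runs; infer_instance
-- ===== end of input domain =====

-- B re-implements split_runs by a different decomposition: collect the boundary indices where the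
-- gap exceeds CONTIGUOUS_GAP in one scan, then emit the runs as slices between consecutive
-- boundaries; same O(n) cost, no streaming accumulator.

-- ===== PORT A =====
-- A's loop body: state (runs, cur); pc = (prev, curr) from zip(series, series[1:])
def aStep (st : List (List (Int × Int)) × List (Int × Int)) (pc : (Int × Int) × (Int × Int)) :
    List (List (Int × Int)) × List (Int × Int) :=
  if pc.2.1 - pc.1.1 ≤ 30 then (st.1, st.2 ++ [pc.2]) else (st.1 ++ [st.2], [pc.2])

def split_runs (series : List (Int × Int)) : List (List (Int × Int)) :=
  match series with
  | [] => []
  | p :: rest =>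
    -- runs, cur = [], [series[0]]; for prev, curr in zip(series, series[1:]): …
    let st := ((p :: rest).zip rest).foldl aStep (([] : List (List (Int × Int))), [p])
    st.1 ++ [st.2]

-- ===== PORT B =====
-- [i for i in range(1, n) if series[i][0] - series[i-1][0] > CONTIGUOUS_GAP]
-- (indices i and i-1 are always in range, so pyGetD's default is never used)
def pvBreaks (series : List (Int × Int)) : List Int :=
  (PySem.List.pyRange 1 (series.length : Int) 1).filter
    (fun i => decide (30 < (PySem.List.pyGetD series i (0, 0)).1
                        - (PySem.List.pyGetD series (i - 1) (0, 0)).1))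

-- bounds = [0] + breaks + [n]
def pvBounds (series : List (Int × Int)) : List Int :=
  0 :: (pvBreaks series ++ [(series.length : Int)])

def split_runs_alt (series : List (Int × Int)) : List (List (Int × Int)) :=
  if series = [] then []
  else
    ((pvBounds series).zip (pvBounds series).tail).map
      (fun be => PySem.List.slice series (some be.1) (some be.2))

-- ===== PRECONDITION & SPEC =====
def Spec_split_runs (series : List (Int × Int)) (out : List (List (Int × Int))) : Prop := out = split_runs_alt series
instance (series : List (Int × Int)) (out : List (List (Int × Int))) : Decidable (Spec_split_runs series out) := by unfold Spec_split_runs; infer_instance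

-- ===== CLAIM (what is proved, stated in full; the proofs are below) =====
def Claim_equal_split_runs : Prop := ∀ (series : List (Int × Int)), Dom_split_runs series → Spec_split_runs series (split_runs series)

-- ===== LEMMAS AND PROOFS =====

-- common recursive characterisation both ports are proved equal to
def runsRec : List (Int × Int) → List (List (Int × Int))
  | [] => []
  | [p] => [[p]]
  | p :: q :: rest =>
    match runsRec (q :: rest) with
    | r :: rs => if q.1 - p.1 ≤ 30 then (p :: r) :: rs else [p] :: r :: rs
    | [] => [[p]]

lemma runsRec_shape : ∀ (rest : List (Int × Int)) (p : Int × Int),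
    ∃ t rs, runsRec (p :: rest) = (p :: t) :: rs := by
  intro rest
  induction rest with
  | nil => intro p; exact ⟨[], [], rfl⟩
  | cons q rest ih =>
    intro p
    obtain ⟨t, rs, h⟩ := ih q
    by_cases hg : q.1 - p.1 ≤ 30
    · exact ⟨q :: t, rs, by simp [runsRec, h, hg]⟩
    · exact ⟨[], (q :: t) :: rs, by simp [runsRec, h, hg]⟩

-- ----- A = runsRec -----
lemma glueA : ∀ (rest : List (Int × Int)) (prev : Int × Int)
    (runs : List (List (Int × Int))) (cur : List (Int × Int))
    (t : List (Int × Int)) (rs : List (List (Int × Int))),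
    runsRec (prev :: rest) = (prev :: t) :: rs →
    (let st := ((prev :: rest).zip rest).foldl aStep (runs, cur)
     st.1 ++ [st.2]) = runs ++ (cur ++ t) :: rs := by
  intro rest
  induction rest with
  | nil =>
    intro prev runs cur t rs h
    simp [runsRec] at h
    obtain ⟨ht, hrs⟩ := h
    subst ht; subst hrs
    simp
  | cons c rest ih =>
    intro prev runs cur t rs h
    obtain ⟨t', rs', hshape⟩ := runsRec_shape rest c
    by_cases hg : c.1 - prev.1 ≤ 30
    · simp only [runsRec, hshape, if_pos hg] at h
      obtain ⟨h1, h2⟩ := List.cons_eq_cons.mp h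
      obtain ⟨-, h1⟩ := List.cons_eq_cons.mp h1
      have := ih c runs (cur ++ [c]) t' rs' hshape
      simp only [List.zip_cons_cons, List.foldl_cons, aStep, if_pos hg] at *
      rw [this, ← h1, ← h2]
      simp
    · simp only [runsRec, hshape, if_neg hg] at h
      obtain ⟨h1, h2⟩ := List.cons_eq_cons.mp h
      obtain ⟨-, h1⟩ := List.cons_eq_cons.mp h1
      have := ih c (runs ++ [cur]) [c] t' rs' hshape
      simp only [List.zip_cons_cons, List.foldl_cons, aStep, if_neg hg] at *
      rw [this, ← h1, ← h2]
      simp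

lemma A_eq_runsRec (series : List (Int × Int)) : split_runs series = runsRec series := by
  cases series with
  | nil => rfl
  | cons p rest =>
    obtain ⟨t, rs, h⟩ := runsRec_shape rest p
    have := glueA rest p [] [p] t rs h
    simp only [split_runs]
    simp at this
    rw [this, h]

-- ----- B = runsRec -----
lemma getD_cons_shift (p : Int × Int) (s : List (Int × Int)) (d : Int × Int) (i : Int) (hi : 0 ≤ i) :
    PySem.List.pyGetD (p :: s) (i + 1) d = PySem.List.pyGetD s i d := by
  rw [show i + 1 = ((i.toNat + 1 : Nat) : Int) by omega,
      show i = ((i.toNat : Nat) : Int) by omega,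
      PySem.List.pyGetD_natCast, PySem.List.pyGetD_natCast, List.getD_cons_succ]
  have hmax : (max i 0).toNat = i.toNat := by omega
  simp [hmax]

lemma slice_shift (p : Int × Int) (s : List (Int × Int)) (a b : Int) (ha : 0 ≤ a) (hb : 0 ≤ b) :
    PySem.List.slice (p :: s) (some (a + 1)) (some (b + 1)) = PySem.List.slice s (some a) (some b) := by
  rw [PySem.List.slice_toNat _ (by omega) (by omega), PySem.List.slice_toNat _ ha hb]
  rw [show (a + 1).toNat = a.toNat + 1 by omega, show (b + 1).toNat = b.toNat + 1 by omega]
  simp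

lemma slice_zero_succ (p : Int × Int) (s : List (Int × Int)) (b : Int) (hb : 0 ≤ b) :
    PySem.List.slice (p :: s) (some 0) (some (b + 1)) = p :: PySem.List.slice s (some 0) (some b) := by
  rw [PySem.List.slice_toNat _ (by omega) (by omega), PySem.List.slice_toNat _ le_rfl hb]
  rw [show (b + 1).toNat = b.toNat + 1 by omega]
  simp [List.take_succ_cons]

lemma map_slice_shift (p : Int × Int) (s : List (Int × Int)) (bs : List Int)
    (h : ∀ x ∈ bs, 0 ≤ x) :
    ((bs.map (· + 1)).zip (bs.map (· + 1)).tail).map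
        (fun be => PySem.List.slice (p :: s) (some be.1) (some be.2))
      = (bs.zip bs.tail).map (fun be => PySem.List.slice s (some be.1) (some be.2)) := by
  rw [← List.map_tail, List.zip_map, List.map_map]
  refine List.map_congr_left ?_
  intro x hx
  have hx1 : x.1 ∈ bs := (List.of_mem_zip hx).1
  have hx2 : x.2 ∈ bs := List.mem_of_mem_tail (List.of_mem_zip hx).2
  simp only [Function.comp, Prod.map]
  exact slice_shift p s x.1 x.2 (h _ hx1) (h _ hx2)

lemma breaks_cons (p q : Int × Int) (rest : List (Int × Int)) :
    pvBreaks (p :: q :: rest)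
      = (if 30 < q.1 - p.1 then [1] else []) ++ (pvBreaks (q :: rest)).map (· + 1) := by
  have hlen : (((p :: q :: rest).length : Nat) : Int) = ((q :: rest).length : Int) + 1 := by
    simp
  have hcons : PySem.List.pyRange 1 ((p :: q :: rest).length : Int) 1
      = 1 :: PySem.List.pyRange 2 (((q :: rest).length : Int) + 1) 1 := by
    have h1 : 1 ≤ (q :: rest).length := Nat.succ_le_succ (Nat.zero_le _)
    rw [hlen, PySem.List.pyRange_one_cons (by omega)]
    norm_num
  have hmap : PySem.List.pyRange 2 (((q :: rest).length : Int) + 1) 1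
      = (PySem.List.pyRange 1 ((q :: rest).length : Int) 1).map (· + 1) := by
    rw [PySem.List.pyRange_one, PySem.List.pyRange_one, List.map_map]
    rw [show (((q :: rest).length : Int) + 1 - 2).toNat = (((q :: rest).length : Int) - 1).toNat by omega]
    refine List.map_congr_left ?_
    intro k _
    change (2 : Int) + (k : Int) = 1 + (k : Int) + 1
    omega
  unfold pvBreaks
  rw [hcons, hmap, List.filter_cons, List.filter_map]
  have h1 : (PySem.List.pyGetD (p :: q :: rest) 1 ((0 : Int), (0 : Int))) = q := by
    have := PySem.List.pyGetD_natCast (p :: q :: rest) 1 ((0 : Int), (0 : Int))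
    norm_num at this
    exact this
  have h0 : (PySem.List.pyGetD (p :: q :: rest) (1 - 1) ((0 : Int), (0 : Int))) = p := by
    norm_num [PySem.List.pyGetD_zero_cons]
  have hfc : (PySem.List.pyRange 1 ((q :: rest).length : Int) 1).filter
        ((fun i => decide (30 < (PySem.List.pyGetD (p :: q :: rest) i (0, 0)).1
            - (PySem.List.pyGetD (p :: q :: rest) (i - 1) (0, 0)).1)) ∘ (· + 1))
      = (PySem.List.pyRange 1 ((q :: rest).length : Int) 1).filter
        (fun i => decide (30 < (PySem.List.pyGetD (q :: rest) i (0, 0)).1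
            - (PySem.List.pyGetD (q :: rest) (i - 1) (0, 0)).1)) := by
    refine List.filter_congr ?_
    intro i hi
    have hmem := (PySem.List.mem_pyRange_one).mp hi
    simp only [Function.comp]
    rw [getD_cons_shift p _ _ i (by omega),
        show i + 1 - 1 = (i - 1) + 1 by ring,
        getD_cons_shift p _ _ (i - 1) (by omega)]
  rw [hfc, h1, h0]
  by_cases hg : 30 < q.1 - p.1
  · simp [hg]
  · simp [hg]

lemma bounds_nonneg (s : List (Int × Int)) :
    ∀ x ∈ pvBreaks s ++ [((s.length : Nat) : Int)], 0 ≤ x := by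
  intro x hx
  rcases List.mem_append.mp hx with h | h
  · have := (PySem.List.mem_pyRange_one).mp (List.mem_of_mem_filter h)
    omega
  · simp at h
    omega

lemma B_eq_runsRec : ∀ (series : List (Int × Int)), split_runs_alt series = runsRec series := by
  intro series
  induction series with
  | nil => rfl
  | cons p tail ih =>
    cases tail with
    | nil =>
      unfold split_runs_alt pvBounds pvBreaks
      rw [if_neg (by simp)]
      rw [show (([p] : List (Int × Int)).length : Int) = 1 by simp,
          PySem.List.pyRange_one_eq_nil le_rfl]
      simp only [List.filter_nil, List.nil_append, List.tail_cons, List.zip_cons_cons,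
        List.zip_nil_right, List.map_cons, List.map_nil]
      rw [PySem.List.slice_toNat _ le_rfl (by norm_num)]
      simp [runsRec]
    | cons q rest =>
      obtain ⟨b1, t2, ht⟩ : ∃ b1 t2,
          pvBreaks (q :: rest) ++ [(((q :: rest).length : Nat) : Int)] = b1 :: t2 :=
        List.exists_cons_of_ne_nil (by simp)
      have hnn : ∀ x ∈ pvBreaks (q :: rest) ++ [(((q :: rest).length : Nat) : Int)], 0 ≤ x :=
        bounds_nonneg (q :: rest)
      have hb1 : 0 ≤ b1 := hnn b1 (by rw [ht]; exact List.mem_cons_self ..)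
      obtain ⟨t', rs', hshape⟩ := runsRec_shape rest q
      have hBtail : split_runs_alt (q :: rest) =
          PySem.List.slice (q :: rest) (some 0) (some b1)
            :: ((b1 :: t2).zip t2).map
                (fun be => PySem.List.slice (q :: rest) (some be.1) (some be.2)) := by
        unfold split_runs_alt pvBounds
        rw [if_neg (by simp), ht]
        simp [List.zip_cons_cons]
      have hlen : (((p :: q :: rest).length : Nat) : Int) = (((q :: rest).length : Nat) : Int) + 1 := by
        simp
      have hmapapp : (pvBreaks (q :: rest)).map (· + 1) ++ [(((q :: rest).length : Nat) : Int) + 1]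
          = (pvBreaks (q :: rest) ++ [(((q :: rest).length : Nat) : Int)]).map (· + 1) := by
        simp
      have htailruns := map_slice_shift p (q :: rest) (b1 :: t2) (by rw [← ht]; exact hnn)
      simp only [List.map_cons, List.tail_cons] at htailruns
      have hB' := ih
      rw [hBtail, hshape] at hB'
      obtain ⟨h1, h2⟩ := List.cons_eq_cons.mp hB'
      unfold split_runs_alt pvBounds
      rw [if_neg (by simp), breaks_cons p q rest, hlen]
      by_cases hg : 30 < q.1 - p.1
      · -- gap: a new run starts at q
        rw [if_pos hg]
        simp only [List.cons_append, List.nil_append]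
        rw [hmapapp, ht]
        simp only [List.map_cons, List.tail_cons, List.zip_cons_cons, List.map_cons]
        have hhead : PySem.List.slice (p :: q :: rest) (some 0) (some (1 : Int)) = [p] := by
          rw [PySem.List.slice_toNat _ le_rfl (by norm_num)]
          rfl
        have hmid : PySem.List.slice (p :: q :: rest) (some 1) (some (b1 + 1))
            = PySem.List.slice (q :: rest) (some 0) (some b1) := by
          rw [show (1 : Int) = 0 + 1 by ring]
          exact slice_shift p (q :: rest) 0 b1 le_rfl hb1
        rw [hhead, hmid, h1, htailruns, h2]
        simp only [runsRec, hshape, if_neg (by omega : ¬ (q.1 - p.1 ≤ 30))]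
      · -- no gap: p joins q's run
        rw [if_neg hg]
        simp only [List.nil_append]
        rw [hmapapp, ht]
        simp only [List.map_cons, List.tail_cons, List.zip_cons_cons, List.map_cons]
        rw [slice_zero_succ p (q :: rest) b1 hb1, h1, htailruns, h2]
        simp only [runsRec, hshape, if_pos (by omega : q.1 - p.1 ≤ 30)]

-- ===== VERDICT (by name: the statement is the Claim_ definition above) =====
theorem split_runs_spec : Claim_equal_split_runs := by
  intro series _
  unfold Spec_split_runs
  rw [A_eq_runsRec, B_eq_runsRec]
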